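-- pv_equiv track=rewrite | github.com/sanzaru/pyws | WebSocketServer.py | _extlen
-- ===== SOURCE A (Python) =====
-- def _extlen(msg):
-- 	l = 0
-- 	for i in range(len(msg)):
-- 		if msg[i] != 0:
-- 			if l == 0:
-- 				l = msg[i]
-- 			else:
-- 				l <<= 8
-- 				l |= msg[i]
-- 	return l
-- ===== SOURCE B (Python) =====
-- def _extlen(msg):
-- 	r = 0
-- 	shift = 0
-- 	for b in reversed(msg):
-- 		if b != 0:
-- 			r |= b << shift
-- 			shift += 8
-- 	return r
-- ===== Notes on version B (the rewrite author's own statement) =====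
-- stated objective: alternative
-- what changed: B builds the result back-to-front: a single reversed pass that ORs each non-zero byte into its final position at a growing shift, replacing A's forward index loop whose accumulator is re-shifted by 8 at every non-zero byte (and whose l==0 special case disappears).
import Mathlib
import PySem

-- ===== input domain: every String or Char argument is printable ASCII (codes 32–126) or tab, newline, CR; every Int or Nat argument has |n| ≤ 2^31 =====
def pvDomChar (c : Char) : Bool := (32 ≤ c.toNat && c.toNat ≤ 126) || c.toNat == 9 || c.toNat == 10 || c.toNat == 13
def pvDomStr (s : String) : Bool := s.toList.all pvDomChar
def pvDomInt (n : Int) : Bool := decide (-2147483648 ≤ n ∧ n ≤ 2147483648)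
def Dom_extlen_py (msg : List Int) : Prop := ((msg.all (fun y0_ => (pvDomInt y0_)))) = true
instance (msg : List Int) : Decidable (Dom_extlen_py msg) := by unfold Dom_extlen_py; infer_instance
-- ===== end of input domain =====

-- B builds the result back-to-front: one reversed pass that ORs each non-zero byte into
-- its final position at a growing shift, instead of A's forward re-shifting accumulator
-- (alternative algorithm, same cost).

-- ===== PORT A =====
-- l <<= 8 is 'l <<< (8:Nat)', l |= b is PySem.Int.bor (Python-exact); msg[i] via pyGetD:
-- the index i drawn from range(len(msg)) is always in range, so no IndexError arises.
def extlen_py (msg : List Int) : Int :=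
  (PySem.List.pyRange 0 (msg.length : Int) 1).foldl
    (fun l i =>
      if PySem.List.pyGetD msg i 0 ≠ 0 then
        (if l = 0 then PySem.List.pyGetD msg i 0
         else PySem.Int.bor (l <<< (8:Nat)) (PySem.List.pyGetD msg i 0))
      else l) 0

-- ===== PORT B =====
-- the state (r, shift); b << shift with the loop's shift counter, a nonnegative multiple
-- of 8, carried as a Nat (Lean's <<< takes a Nat exponent; Python-exact for shift ≥ 0).
def extlen_py_alt (msg : List Int) : Int :=
  (msg.reverse.foldl
    (fun (st : Int × Nat) (b : Int) =>
      if b ≠ 0 then (PySem.Int.bor st.1 (b <<< st.2), st.2 + 8) else st)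
    ((0 : Int), (0 : Nat))).1

-- ===== PRECONDITION & SPEC =====
def Spec_extlen_py (msg : List Int) (out : Int) : Prop := out = extlen_py_alt msg
instance (msg : List Int) (out : Int) : Decidable (Spec_extlen_py msg out) := by unfold Spec_extlen_py; infer_instance

-- ===== CLAIM (what is proved, stated in full; the proofs are below) =====
def Claim_equal_extlen_py : Prop := ∀ (msg : List Int), Dom_extlen_py msg → Spec_extlen_py msg (extlen_py msg)

-- ===== LEMMAS AND PROOFS =====

-- ## Nat layer: bit identities proved by testBit extensionality / binary induction

-- or of disjoint bit ranges is addition: (m <<< k) ||| n = m * 2^k + n for n < 2^k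
theorem pv_shl_lor_eq_add (k m n : Nat) (h : n < 2 ^ k) : (m <<< k) ||| n = m * 2 ^ k + n := by
  induction k generalizing n with
  | zero =>
    interval_cases n
    simp
  | succ k ih =>
    have hbit : (m <<< (k+1)) ||| n = Nat.bit false (m <<< k) ||| Nat.bit (decide (n % 2 = 1)) (n / 2) := by
      congr 1
      · simp [Nat.bit, Nat.shiftLeft_eq]; ring
      · rcases Nat.mod_two_eq_zero_or_one n with h2 | h2 <;> simp [Nat.bit, h2] <;> omega
    have hlt : n / 2 < 2 ^ k := by rw [pow_succ] at h; omega
    rw [hbit, Nat.lor_bit]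
    simp only [Nat.bit, Bool.false_or]
    rw [ih (n / 2) hlt]
    rcases Nat.mod_two_eq_zero_or_one n with h2 | h2 <;> simp [h2, pow_succ] <;> ring_nf <;> omega

-- ldiff + land recovers the number (binary induction)
theorem pv_ldiff_add_land (n : Nat) : ∀ p : Nat, Nat.ldiff n p + (n &&& p) = n := by
  induction n using Nat.strong_induction_on with
  | _ n ih =>
    intro p
    rcases Nat.eq_zero_or_pos n with rfl | hn
    · have h1 : Nat.ldiff 0 p = 0 := by
        apply Nat.eq_of_testBit_eq
        intro i
        simp [Nat.testBit_ldiff]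
      simp [h1]
    · have hbn : n = Nat.bit (decide (n % 2 = 1)) (n / 2) := by
        rcases Nat.mod_two_eq_zero_or_one n with h2 | h2 <;> simp [Nat.bit, h2] <;> omega
      have hbp : p = Nat.bit (decide (p % 2 = 1)) (p / 2) := by
        rcases Nat.mod_two_eq_zero_or_one p with h2 | h2 <;> simp [Nat.bit, h2] <;> omega
      have hih := ih (n / 2) (Nat.div_lt_self hn (by norm_num)) (p / 2)
      conv_lhs => rw [hbn, hbp]
      rw [Nat.ldiff_bit, Nat.land_bit]
      rcases Nat.mod_two_eq_zero_or_one n with h2 | h2 <;>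
        rcases Nat.mod_two_eq_zero_or_one p with h3 | h3 <;>
        simp [Nat.bit, h2, h3] <;> omega

theorem pv_sub_land (n p : Nat) : n - (n &&& p) = Nat.ldiff n p := by
  have := pv_ldiff_add_land n p
  omega

-- shift distributes over or / and / ldiff, with the low bits held by the mask 2^k-1
theorem pv_nat_shl_lor (p q k : Nat) : (p ||| q) <<< k = p <<< k ||| q <<< k := by
  apply Nat.eq_of_testBit_eq
  intro i
  simp only [Nat.testBit_lor, Nat.testBit_shiftLeft]
  by_cases h : k ≤ i <;> simp [h]

theorem pv_nat_ldiff_shl (n p k : Nat) :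
    Nat.ldiff (n <<< k ||| (2 ^ k - 1)) (p <<< k) = (Nat.ldiff n p) <<< k ||| (2 ^ k - 1) := by
  apply Nat.eq_of_testBit_eq
  intro i
  simp only [Nat.testBit_lor, Nat.testBit_ldiff, Nat.testBit_shiftLeft, Nat.testBit_two_pow_sub_one]
  by_cases h : k ≤ i
  · simp [h, show ¬ i < k by omega]
  · simp [h, show i < k by omega]

theorem pv_nat_land_shl (m n k : Nat) :
    (m <<< k ||| (2 ^ k - 1)) &&& (n <<< k ||| (2 ^ k - 1)) = (m &&& n) <<< k ||| (2 ^ k - 1) := by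
  apply Nat.eq_of_testBit_eq
  intro i
  simp only [Nat.testBit_lor, Nat.testBit_land, Nat.testBit_shiftLeft, Nat.testBit_two_pow_sub_one]
  by_cases h : k ≤ i
  · simp [h, show ¬ i < k by omega]
  · simp [h, show i < k by omega]

-- associativity-shaped ldiff identities (all testBit tautologies)
theorem pv_ldiff_lor (n p q : Nat) : Nat.ldiff n (p ||| q) = Nat.ldiff (Nat.ldiff n q) p := by
  apply Nat.eq_of_testBit_eq
  intro i
  simp only [Nat.testBit_ldiff, Nat.testBit_lor]
  cases n.testBit i <;> cases p.testBit i <;> cases q.testBit i <;> rfl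

theorem pv_ldiff_right_comm (n p r : Nat) :
    Nat.ldiff (Nat.ldiff n p) r = Nat.ldiff (Nat.ldiff n r) p := by
  apply Nat.eq_of_testBit_eq
  intro i
  simp only [Nat.testBit_ldiff]
  cases n.testBit i <;> cases p.testBit i <;> cases r.testBit i <;> rfl

theorem pv_ldiff_land_left (m p n : Nat) : (Nat.ldiff m p) &&& n = Nat.ldiff (m &&& n) p := by
  apply Nat.eq_of_testBit_eq
  intro i
  simp only [Nat.testBit_ldiff, Nat.testBit_land]
  cases m.testBit i <;> cases p.testBit i <;> cases n.testBit i <;> rfl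

theorem pv_ldiff_land_swap (m p n : Nat) : (Nat.ldiff m p) &&& n = m &&& Nat.ldiff n p := by
  apply Nat.eq_of_testBit_eq
  intro i
  simp only [Nat.testBit_ldiff, Nat.testBit_land]
  cases m.testBit i <;> cases p.testBit i <;> cases n.testBit i <;> rfl

theorem pv_land_ldiff (m n r : Nat) : Nat.ldiff (m &&& n) r = m &&& Nat.ldiff n r := by
  apply Nat.eq_of_testBit_eq
  intro i
  simp only [Nat.testBit_ldiff, Nat.testBit_land]
  cases m.testBit i <;> cases n.testBit i <;> cases r.testBit i <;> rfl

-- ## Int layer: every Int is ↑p or -↑n-1; bor/<<< in that normal form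

theorem pv_int_cases (x : Int) : (∃ p : Nat, x = ↑p) ∨ (∃ n : Nat, x = -↑n - 1) := by
  cases x with
  | ofNat p => exact Or.inl ⟨p, rfl⟩
  | negSucc n => exact Or.inr ⟨n, by simp [Int.negSucc_eq]; ring⟩

theorem pv_borPN (p n : Nat) : PySem.Int.bor ↑p (-↑n - 1) = -↑(Nat.ldiff n p) - 1 := by
  unfold PySem.Int.bor
  rw [if_pos (by positivity), if_neg (by omega)]
  have h1 : (-(-(n:Int) - 1) - 1).toNat = n := by omega
  have h2 : ((p:Int)).toNat = p := Int.toNat_natCast p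
  rw [h1, h2, pv_sub_land]

theorem pv_borNP (m p : Nat) : PySem.Int.bor (-↑m - 1) ↑p = -↑(Nat.ldiff m p) - 1 := by
  rw [PySem.Int.bor_comm]
  exact pv_borPN p m

theorem pv_borNN (m n : Nat) : PySem.Int.bor (-↑m - 1) (-↑n - 1) = -↑(m &&& n) - 1 := by
  unfold PySem.Int.bor
  rw [if_neg (by omega), if_neg (by omega)]
  have h1 : (-(-(m:Int) - 1) - 1).toNat = m := by omega
  have h2 : (-(-(n:Int) - 1) - 1).toNat = n := by omega
  rw [h1, h2]

theorem pv_shlP (p k : Nat) : ((p : Int)) <<< k = ↑(p <<< k) := by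
  rw [Int.shiftLeft_eq, Nat.shiftLeft_eq]
  push_cast
  ring

theorem pv_shlN (n k : Nat) : ((-↑n - 1 : Int)) <<< k = -↑(n <<< k ||| (2 ^ k - 1)) - 1 := by
  rw [Int.shiftLeft_eq, pv_shl_lor_eq_add k n (2 ^ k - 1) (by have := Nat.one_le_two_pow (n := k); omega)]
  have h1 : (1:Nat) ≤ 2 ^ k := Nat.one_le_two_pow
  push_cast [h1]
  ring

-- shift distributes over bor (all four sign cases)
theorem pv_bor_shl (x y : Int) (k : Nat) :
    (PySem.Int.bor x y) <<< k = PySem.Int.bor (x <<< k) (y <<< k) := by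
  rcases pv_int_cases x with ⟨p, rfl⟩ | ⟨m, rfl⟩ <;> rcases pv_int_cases y with ⟨q, rfl⟩ | ⟨n, rfl⟩
  · rw [PySem.Int.bor_natCast, pv_shlP, pv_shlP, pv_shlP, PySem.Int.bor_natCast, pv_nat_shl_lor]
  · rw [pv_borPN, pv_shlN, pv_shlP, pv_shlN, pv_borPN, pv_nat_ldiff_shl]
  · rw [pv_borNP, pv_shlN, pv_shlN, pv_shlP, pv_borNP, pv_nat_ldiff_shl]
  · rw [pv_borNN, pv_shlN, pv_shlN, pv_shlN, pv_borNN, pv_nat_land_shl]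

-- bor is associative (eight sign cases, each a Nat identity)
theorem pv_bor_assoc (x y z : Int) :
    PySem.Int.bor (PySem.Int.bor x y) z = PySem.Int.bor x (PySem.Int.bor y z) := by
  rcases pv_int_cases x with ⟨p, rfl⟩ | ⟨m, rfl⟩ <;>
    rcases pv_int_cases y with ⟨q, rfl⟩ | ⟨n, rfl⟩ <;>
    rcases pv_int_cases z with ⟨r, rfl⟩ | ⟨o, rfl⟩
  · rw [PySem.Int.bor_natCast, PySem.Int.bor_natCast, PySem.Int.bor_natCast, PySem.Int.bor_natCast, Nat.lor_assoc]
  · rw [PySem.Int.bor_natCast, pv_borPN, pv_borPN, pv_borPN, pv_ldiff_lor, pv_ldiff_right_comm]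
  · rw [pv_borPN, pv_borNP, pv_borNP, pv_borPN, pv_ldiff_right_comm]
  · rw [pv_borPN, pv_borNN, pv_borNN, pv_borPN, pv_ldiff_land_left]
  · rw [pv_borNP, PySem.Int.bor_natCast, pv_borNP, pv_borNP, pv_ldiff_lor, pv_ldiff_right_comm]
  · rw [pv_borNP, pv_borNN, pv_borPN, pv_borNN, pv_ldiff_land_swap]
  · rw [pv_borNN, pv_borNP, pv_borNP, pv_borNN, pv_land_ldiff]
  · rw [pv_borNN, pv_borNN, pv_borNN, pv_borNN, Nat.land_assoc]

-- small shift facts on Int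
theorem pv_shl_shl (x : Int) (a b : Nat) : (x <<< a) <<< b = x <<< (a + b) := by
  rw [Int.shiftLeft_eq, Int.shiftLeft_eq, Int.shiftLeft_eq, pow_add]
  ring

theorem pv_shl_zero_exp (x : Int) : x <<< (0 : Nat) = x := by
  rw [Int.shiftLeft_eq]
  simp

theorem pv_zero_shl (k : Nat) : (0 : Int) <<< k = 0 := by
  rw [Int.shiftLeft_eq]
  ring

-- ## fold layer

-- A's loop body: the l==0 branch is redundant, since (0 <<< 8) ||| b = b
theorem pv_step_collapse (l b : Int) :
    (if b ≠ 0 then (if l = 0 then b else PySem.Int.bor (l <<< (8:Nat)) b) else l)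
      = (if b ≠ 0 then PySem.Int.bor (l <<< (8:Nat)) b else l) := by
  by_cases h : b = 0
  · simp [h]
  · by_cases hl : l = 0
    · subst hl
      rw [if_pos h, if_pos h, if_pos rfl, pv_zero_shl, PySem.Int.bor_comm, PySem.Int.bor_zero]
    · rw [if_pos h, if_pos h, if_neg hl]

-- invariant: A's forward fold from accumulator l is B's backward result ORed with l
-- shifted past all the bytes B placed
theorem pv_fold_inv (msg : List Int) (l : Int) :
    msg.foldl (fun l b => if b ≠ 0 then PySem.Int.bor (l <<< (8:Nat)) b else l) l
      = PySem.Int.bor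
          ((msg.reverse.foldl (fun (st : Int × Nat) (b : Int) => if b ≠ 0 then (PySem.Int.bor st.1 (b <<< st.2), st.2 + 8) else st) (0, 0)).1)
          (l <<< ((msg.reverse.foldl (fun (st : Int × Nat) (b : Int) => if b ≠ 0 then (PySem.Int.bor st.1 (b <<< st.2), st.2 + 8) else st) (0, 0)).2)) := by
  induction msg generalizing l with
  | nil =>
    simp only [List.reverse_nil, List.foldl_nil]
    rw [pv_shl_zero_exp, PySem.Int.bor_comm, PySem.Int.bor_zero]
  | cons b t ih =>
    rw [List.foldl_cons, List.reverse_cons, List.foldl_append, List.foldl_cons, List.foldl_nil, ih]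
    set st := t.reverse.foldl (fun (st : Int × Nat) (b : Int) => if b ≠ 0 then (PySem.Int.bor st.1 (b <<< st.2), st.2 + 8) else st) (0, 0) with hst
    by_cases h : b = 0
    · simp [h]
    · rw [if_pos h, if_pos h]
      simp only
      rw [pv_bor_shl, pv_shl_shl, PySem.Int.bor_comm (l <<< (8 + st.2)) (b <<< st.2),
        ← pv_bor_assoc, Nat.add_comm 8 st.2]

-- ===== VERDICT (by name: the statement is the Claim_ definition above) =====
theorem extlen_py_spec : Claim_equal_extlen_py := by
  intro msg _
  unfold Spec_extlen_py extlen_py extlen_py_alt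
  rw [PySem.List.foldl_pyRange_zero_pyGetD' msg 0
    (fun l b => if b ≠ 0 then (if l = 0 then b else PySem.Int.bor (l <<< (8:Nat)) b) else l) 0]
  have hcol : (fun (l b : Int) => if b ≠ 0 then (if l = 0 then b else PySem.Int.bor (l <<< (8:Nat)) b) else l)
      = fun (l b : Int) => if b ≠ 0 then PySem.Int.bor (l <<< (8:Nat)) b else l := by
    funext l b
    exact pv_step_collapse l b
  rw [hcol, pv_fold_inv msg 0, pv_zero_shl, PySem.Int.bor_zero]
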